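-- pv_equiv track=rewrite | github.com/lan33-ccac/CIT-119 | Powerball.py | get_most_overdue
-- ===== SOURCE A (Python) =====
-- RANGE = 10   # for min and max functions
--
-- def get_most_overdue(list, outputfile):
--
--     input_list = [] + list
--     temp_list = []
--     most_overdue_list = []
--     listlen = 0
--     i = 0
--     curr_num = 0
--
--     max_index = 0
--
--     listlen = len(input_list)
--
--     for i in range(listlen):
--         curr_num = input_list[i]
--         curr_index = input_list.index(curr_num)
--         max_index = curr_index
--         n =  0
--
--         for n in range(listlen):
--             if curr_num == input_list[n]:
--                 curr_index = n
--         max_index = curr_index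
--
--         temp_list.append(max_index)
--
--
--     # Loop through list, and append values corresponding to list of least indexes in temp_list to most_overdue_list
--     i = 0
--     least_index = 0
--     for i in range(listlen):
--         least_index = min(temp_list)
--         least_value = input_list[least_index]
--         if least_value not in most_overdue_list:
--             most_overdue_list.append(input_list[least_index])
--         temp_list.remove(least_index)
--
--     most_overdue_list = most_overdue_list[0:RANGE]
--
--     return most_overdue_list
-- ===== SOURCE B (Python) =====
-- def get_most_overdue(list, outputfile):
--     # one reverse pass with a seen-set: distinct values ordered by last occurrence
--     seen = set()
--     out = []
--     for v in reversed(list):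
--         if v not in seen:
--             seen.add(v)
--             out.append(v)
--     out.reverse()
--     return out[:10]
-- ===== Notes on version B (the rewrite author's own statement) =====
-- stated objective: faster
-- what changed: Replaced A's nested last-index scans plus repeated min/remove selection (three quadratic loops) with a single reverse pass deduplicating via a hash set, then reverse and take 10.
import Mathlib
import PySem

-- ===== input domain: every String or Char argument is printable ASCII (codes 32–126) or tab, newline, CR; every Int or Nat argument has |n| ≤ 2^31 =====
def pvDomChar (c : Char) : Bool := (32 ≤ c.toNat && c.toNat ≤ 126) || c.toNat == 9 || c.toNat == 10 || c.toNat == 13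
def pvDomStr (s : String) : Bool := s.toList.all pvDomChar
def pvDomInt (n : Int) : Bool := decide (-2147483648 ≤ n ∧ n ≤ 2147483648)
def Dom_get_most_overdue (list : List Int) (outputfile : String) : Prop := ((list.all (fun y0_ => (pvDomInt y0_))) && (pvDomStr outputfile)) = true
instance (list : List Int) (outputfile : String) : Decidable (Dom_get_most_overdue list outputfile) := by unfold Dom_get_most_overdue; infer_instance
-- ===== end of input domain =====

-- B replaces A's nested last-index scans and repeated min/remove selection by one
-- reverse pass with a seen-set (distinct values ordered by last occurrence), then take 10.

-- ===== PORT A =====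
-- all list indexing below is in range (loop indices come from range(len)), so pyGetD/getD-forms are exact
def get_most_overdue (list : List Int) (outputfile : String) : List Int :=
  let input_list : List Int := ([] : List Int) ++ list
  let listlen : Int := (input_list.length : Int)
  -- first loop: for i in range(listlen): inner scan records the last index of input_list[i]
  let temp_list : List Int :=
    (PySem.List.pyRange 0 listlen 1).foldl (fun temp i =>
      let curr_num := PySem.List.pyGetD input_list i 0
      let curr_index0 : Int := (((PySem.List.index? input_list curr_num).getD 0 : Nat) : Int)
      let curr_index :=
        (PySem.List.pyRange 0 listlen 1).foldl (fun ci n =>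
          if curr_num = PySem.List.pyGetD input_list n 0 then n else ci) curr_index0
      temp ++ [curr_index]) []
  -- second loop: repeatedly take min(temp_list), append its value if new, remove it
  let res : List Int × List Int :=
    (PySem.List.pyRange 0 listlen 1).foldl (fun (st : List Int × List Int) _ =>
      let least_index := (PySem.List.min? st.1 (fun x => x)).getD 0
      let least_value := PySem.List.pyGetD input_list least_index 0
      let mo := if least_value ∈ st.2 then st.2 else st.2 ++ [PySem.List.pyGetD input_list least_index 0]
      let temp := (PySem.List.remove? st.1 least_index).getD st.1
      (temp, mo)) (temp_list, [])
  PySem.List.slice res.2 (some 0) (some 10)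

-- ===== PORT B =====
def get_most_overdue_alt (list : List Int) (outputfile : String) : List Int :=
  let st : PySem.Set Int × List Int :=
    list.reverse.foldl (fun (st : PySem.Set Int × List Int) v =>
      if PySem.Set.contains st.1 v then st else (PySem.Set.add st.1 v, st.2 ++ [v]))
      (PySem.Set.empty, [])
  PySem.List.slice st.2.reverse none (some 10)

-- ===== PRECONDITION & SPEC =====
def Spec_get_most_overdue (list : List Int) (outputfile : String) (out : List Int) : Prop := out = get_most_overdue_alt list outputfile
instance (list : List Int) (outputfile : String) (out : List Int) : Decidable (Spec_get_most_overdue list outputfile out) := by unfold Spec_get_most_overdue; infer_instance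

-- ===== CLAIM (what is proved, stated in full; the proofs are below) =====
def Claim_equal_get_most_overdue : Prop := ∀ (list : List Int) (outputfile : String), Dom_get_most_overdue list outputfile → Spec_get_most_overdue list outputfile (get_most_overdue list outputfile)

-- ===== LEMMAS AND PROOFS =====

-- first-occurrence dedup (reference form both loops are reduced to)
def pvFdd : List Int → List Int
  | [] => []
  | a :: r => a :: (pvFdd r).filter (fun x => x ≠ a)

-- "j is the last occurrence of its value in l"
def pvIsLast (l : List Int) (j : Nat) : Prop :=
  j < l.length ∧ ∀ k, j < k → k < l.length → l.getD k 0 ≠ l.getD j 0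

-- indices of last occurrences, in increasing order
def pvC (l : List Int) : List Nat :=
  (List.range l.length).filter (fun j => decide (∀ k < l.length, j < k → l.getD k 0 ≠ l.getD j 0))

def pvVstep (acc : List Int) (v : Int) : List Int := if v ∈ acc then acc else acc ++ [v]

theorem pv_mem_fdd (r : List Int) (x : Int) : x ∈ pvFdd r ↔ x ∈ r := by
  induction r with
  | nil => simp [pvFdd]
  | cons a t ih =>
    by_cases hx : x = a <;> simp [pvFdd, List.mem_filter, hx, ih]

theorem pv_fdd_pairwise (P : Int → Int → Prop) (r : List Int) (h : r.Pairwise P) :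
    (pvFdd r).Pairwise P := by
  induction r with
  | nil => simp [pvFdd]
  | cons a t ih =>
    rcases List.pairwise_cons.mp h with ⟨ha, ht⟩
    refine List.pairwise_cons.mpr ⟨?_, (ih ht).sublist (List.filter_sublist ..)⟩
    intro x hx
    exact ha x ((pv_mem_fdd t x).mp (List.mem_of_mem_filter hx))

theorem pv_fdd_nodup (r : List Int) : (pvFdd r).Nodup := by
  induction r with
  | nil => simp [pvFdd]
  | cons a t ih =>
    refine List.nodup_cons.mpr ⟨?_, ih.sublist (List.filter_sublist ..)⟩
    intro hmem
    have := List.of_mem_filter hmem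
    simp at this

theorem pv_fdd_map_inj (f : Int → Int) (r : List Int)
    (hinj : ∀ x ∈ r, ∀ y ∈ r, f x = f y → x = y) :
    pvFdd (r.map f) = (pvFdd r).map f := by
  induction r with
  | nil => simp [pvFdd]
  | cons a t ih =>
    simp only [List.map_cons, pvFdd]
    rw [ih (fun x hx y hy => hinj x (by simp [hx]) y (by simp [hy]))]
    rw [List.filter_map]
    congr 1
    congr 1
    apply List.filter_congr
    intro x hx
    have hxt : x ∈ t := (pv_mem_fdd t x).mp hx
    simp only [Function.comp]
    by_cases hxa : x = a
    · simp [hxa]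
    · simp only [decide_eq_decide]
      constructor
      · intro hfa; exact fun hf => hfa (by rw [hf])
      · intro _ hf; exact hxa (hinj x (by simp [hxt]) a (by simp) hf)

theorem pv_vfold (V : List Int) (acc : List Int) :
    V.foldl pvVstep acc = acc ++ (pvFdd V).filter (fun v => decide (v ∉ acc)) := by
  induction V generalizing acc with
  | nil => simp [pvFdd]
  | cons v V ih =>
    simp only [List.foldl_cons, pvFdd, List.filter_cons]
    by_cases hv : v ∈ acc
    · have h1 : pvVstep acc v = acc := by simp [pvVstep, hv]
      rw [h1, ih]
      simp only [hv, not_true_eq_false, decide_false, Bool.false_eq_true, if_false]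
      rw [List.filter_filter]
      congr 1
      apply List.filter_congr
      intro x _
      by_cases hx : x ∈ acc
      · simp [hx]
      · have : x ≠ v := fun h => hx (h ▸ hv)
        simp [hx, this]
    · have h1 : pvVstep acc v = acc ++ [v] := by simp [pvVstep, hv]
      rw [h1, ih]
      simp only [hv, not_false_eq_true, decide_true, if_true, List.append_assoc,
        List.cons_append, List.nil_append]
      congr 1
      rw [List.filter_filter]
      congr 1
      apply List.filter_congr
      intro x _
      by_cases hxv : x = v
      · simp [hxv]
      · by_cases hx : x ∈ acc <;> simp [hx, hxv]
theorem pv_vfold_nil (V : List Int) : V.foldl pvVstep [] = pvFdd V := by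
  rw [pv_vfold]
  simp

theorem pv_bfold (r : List Int) : ∀ out : List Int,
    (r.foldl (fun (st : PySem.Set Int × List Int) v =>
      if PySem.Set.contains st.1 v then st else (PySem.Set.add st.1 v, st.2 ++ [v])) (out, out)).2
      = r.foldl pvVstep out := by
  induction r with
  | nil => intro out; rfl
  | cons v r ih =>
    intro out
    simp only [List.foldl_cons]
    by_cases hv : v ∈ out
    · have hcv : PySem.Set.contains out v = true := by
        rw [PySem.Set.contains_eq_decide]; simpa
      rw [hcv]
      simp only [if_true]
      have hstep : pvVstep out v = out := by simp [pvVstep, hv]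
      rw [hstep]
      exact ih out
    · have hcv : PySem.Set.contains out v = false := by
        rw [PySem.Set.contains_eq_decide]; simpa
      rw [hcv]
      simp only [Bool.false_eq_true, if_false]
      have hadd : PySem.Set.add out v = out ++ [v] := by
        simp [PySem.Set.add, hv]
      have hstep : pvVstep out v = out ++ [v] := by simp [pvVstep, hv]
      rw [hadd, hstep]
      exact ih (out ++ [v])

theorem pv_sorted_cons (T : List Int) (hT : T ≠ []) :
    ∃ m t, PySem.List.min? T (fun x => x) = some m ∧ m ∈ T ∧
      PySem.List.sorted T (fun x => x) false = m :: t ∧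
      PySem.List.sorted (T.erase m) (fun x => x) false = t := by
  obtain ⟨m, hm⟩ : ∃ m, PySem.List.min? T (fun x => x) = some m := by
    cases hmin : PySem.List.min? T (fun x => x) with
    | none => exact absurd ((PySem.List.min?_eq_none_iff T _).mp hmin) hT
    | some m => exact ⟨m, rfl⟩
  have hmT : m ∈ T := PySem.List.min?_mem hm
  have hmin : ∀ y ∈ T, m ≤ y := fun y hy => PySem.List.min?_isMin hm y hy
  have hperm : (PySem.List.sorted T (fun x => x) false).Perm T := PySem.List.sorted_perm T _ _
  have hpw : (PySem.List.sorted T (fun x => x) false).Pairwise (fun a b => a ≤ b) :=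
    PySem.List.sorted_pairwise T _
  cases hX : PySem.List.sorted T (fun x => x) false with
  | nil =>
    exact absurd ((hX ▸ hperm).symm.eq_nil) hT
  | cons h t =>
    have hXperm := hX ▸ hperm
    have hXpw := hX ▸ hpw
    have hhT : h ∈ T := hXperm.mem_iff.mp (List.mem_cons_self)
    have hhm : h = m := by
      refine le_antisymm ?_ (hmin h hhT)
      have hmX : m ∈ h :: t := hXperm.mem_iff.mpr hmT
      rcases List.mem_cons.mp hmX with he | hmt
      · omega
      · exact (List.pairwise_cons.mp hXpw).1 m hmt
    subst hhm
    refine ⟨h, t, hm, hmT, rfl, ?_⟩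
    have hperm2 : (PySem.List.sorted (T.erase h) (fun x => x) false).Perm t := by
      refine (PySem.List.sorted_perm (T.erase h) _ _).trans ?_
      have : (T.erase h).Perm ((h :: t).erase h) := (hXperm.symm.erase h)
      simpa using this
    exact List.Perm.eq_of_pairwise (fun a b _ _ h1 h2 => le_antisymm h1 h2)
      (PySem.List.sorted_pairwise (T.erase h) _) ((List.pairwise_cons.mp hXpw).2) hperm2

theorem pv_loop2 (l : List Int) (fuel : List Int) : ∀ (T acc : List Int), T.length = fuel.length →
    (fuel.foldl (fun (st : List Int × List Int) _ =>
      ((PySem.List.remove? st.1 ((PySem.List.min? st.1 (fun x => x)).getD 0)).getD st.1,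
        if PySem.List.pyGetD l ((PySem.List.min? st.1 (fun x => x)).getD 0) 0 ∈ st.2 then st.2
        else st.2 ++ [PySem.List.pyGetD l ((PySem.List.min? st.1 (fun x => x)).getD 0) 0])) (T, acc)).2
    = ((PySem.List.sorted T (fun x => x) false).map (fun j => PySem.List.pyGetD l j 0)).foldl pvVstep acc := by
  induction fuel with
  | nil =>
    intro T acc hlen
    have hT : T = [] := List.eq_nil_of_length_eq_zero hlen
    subst hT
    have hs : PySem.List.sorted ([] : List Int) (fun x => x) false = [] :=
      (PySem.List.sorted_perm ([] : List Int) _ _).eq_nil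
    simp [hs]
  | cons f fs ih =>
    intro T acc hlen
    have hT : T ≠ [] := by
      intro h; subst h; simp at hlen
    obtain ⟨m, t, hmin, hmT, hsort, hsort'⟩ := pv_sorted_cons T hT
    rw [List.foldl_cons]
    simp only [hmin, Option.getD_some, PySem.List.remove?_eq_some_erase T m hmT]
    rw [ih (T.erase m) _ (by rw [List.length_erase_of_mem hmT, hlen]; simp)]
    rw [hsort, hsort', List.map_cons, List.foldl_cons]
    rfl

theorem pv_last_unique (l : List Int) (j1 j2 : Nat) (h1 : pvIsLast l j1) (h2 : pvIsLast l j2)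
    (hv : l.getD j1 0 = l.getD j2 0) : j1 = j2 := by
  rcases h1 with ⟨hl1, hlast1⟩
  rcases h2 with ⟨hl2, hlast2⟩
  by_contra hne
  rcases Nat.lt_or_ge j1 j2 with h | h
  · exact hlast1 j2 h hl2 hv.symm
  · exact hlast2 j1 (Nat.lt_of_le_of_ne h (Ne.symm (fun he => hne he))) hl1 hv

theorem pv_mem_C (l : List Int) (j : Nat) : j ∈ pvC l ↔ pvIsLast l j := by
  simp only [pvC, List.mem_filter, List.mem_range, decide_eq_true_eq, pvIsLast]
  constructor
  · rintro ⟨hj, h⟩; exact ⟨hj, fun k hk1 hk2 => h k hk2 hk1⟩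
  · rintro ⟨hj, h⟩; exact ⟨hj, fun k hk2 hk1 => h k hk1 hk2⟩

theorem pv_inner (l : List Int) (v : Int) (m : Nat) (init : Int)
    (hex : ∃ i, i < m ∧ l.getD i 0 = v) :
    ∃ j : Nat, (List.range m).foldl (fun ci k => if v = l.getD k 0 then ((k : Nat) : Int) else ci) init = (j : Int)
      ∧ j < m ∧ l.getD j 0 = v ∧ ∀ k, j < k → k < m → l.getD k 0 ≠ v := by
  induction m with
  | zero => omega
  | succ m ih =>
    rw [List.range_succ, List.foldl_append, List.foldl_cons, List.foldl_nil]
    by_cases hm : v = l.getD m 0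
    · refine ⟨m, by simp [hm], Nat.lt_succ_self m, hm.symm, fun k hk1 hk2 => by omega⟩
    · rcases hex with ⟨i, hi, hiv⟩
      have him : i < m := by
        rcases Nat.lt_or_ge i m with h | h
        · exact h
        · exfalso; have : i = m := by omega
          exact hm (this ▸ hiv).symm
      rcases ih ⟨i, him, hiv⟩ with ⟨j, hj, hjm, hjv, hjlast⟩
      refine ⟨j, by rw [if_neg hm]; exact hj, Nat.lt_succ_of_lt hjm, hjv, ?_⟩
      intro k hk1 hk2
      rcases Nat.lt_or_ge k m with h | h
      · exact hjlast k hk1 h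
      · have : k = m := by omega
        subst this
        exact fun he => hm he.symm

theorem pv_fdd_sorted (l : List Int) (T : List Int)
    (hmem : ∀ x, x ∈ T ↔ ∃ j ∈ pvC l, x = (j : Int)) :
    pvFdd (PySem.List.sorted T (fun x => x) false) = (pvC l).map (fun (j : Nat) => (j : Int)) := by
  have hA_nodup : (pvFdd (PySem.List.sorted T (fun x => x) false)).Nodup := pv_fdd_nodup _
  have hA_pw : (pvFdd (PySem.List.sorted T (fun x => x) false)).Pairwise (· ≤ ·) :=
    pv_fdd_pairwise _ _ (PySem.List.sorted_pairwise T _)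
  have hC_nodup : (pvC l).Nodup := (List.nodup_range).filter _
  have hC_pw : (pvC l).Pairwise (· < ·) := (List.pairwise_lt_range).sublist (List.filter_sublist ..)
  have hB_nodup : ((pvC l).map (fun (j : Nat) => (j : Int))).Nodup :=
    hC_nodup.map (fun a b h => by exact_mod_cast h)
  have hB_pw : ((pvC l).map (fun (j : Nat) => (j : Int))).Pairwise (· ≤ ·) := by
    rw [List.pairwise_map]
    refine hC_pw.imp ?_
    intro a b h
    exact_mod_cast Nat.le_of_lt h
  have hperm : (pvFdd (PySem.List.sorted T (fun x => x) false)).Perm ((pvC l).map (fun (j : Nat) => (j : Int))) := by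
    rw [List.perm_ext_iff_of_nodup hA_nodup hB_nodup]
    intro x
    rw [pv_mem_fdd, PySem.List.mem_sorted, hmem, List.mem_map]
    constructor
    · rintro ⟨j, hj, hx⟩; exact ⟨j, hj, hx.symm⟩
    · rintro ⟨j, hj, hx⟩; exact ⟨j, hj, hx.symm⟩
  exact List.Perm.eq_of_pairwise (fun a b _ _ h1 h2 => le_antisymm h1 h2) hA_pw hB_pw hperm

theorem pv_getD_append (l : List Int) (a : Int) (j : Nat) (hj : j < l.length) :
    (l ++ [a]).getD j 0 = l.getD j 0 := by
  simp [List.getD_eq_getElem?_getD, List.getElem?_append_left hj]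

theorem pv_getD_append_self (l : List Int) (a : Int) :
    (l ++ [a]).getD l.length 0 = a := by
  simp [List.getD_eq_getElem?_getD]

theorem pvFdd_cons (a : Int) (r : List Int) :
    pvFdd (a :: r) = a :: (pvFdd r).filter (fun x => x ≠ a) := rfl

theorem pv_C_append (l : List Int) (a : Int) :
    pvC (l ++ [a]) = (pvC l).filter (fun j => decide (l.getD j 0 ≠ a)) ++ [l.length] := by
  unfold pvC
  rw [List.length_append, List.length_singleton, List.range_succ, List.filter_append]
  congr 1
  · rw [List.filter_congr (q := fun j => decide (∀ k < l.length, j < k → l.getD k 0 ≠ l.getD j 0)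
        && decide (l.getD j 0 ≠ a)) ?_]
    · rw [← List.filter_filter, List.filter_comm]
    · intro j hj
      have hjn : j < l.length := List.mem_range.mp hj
      rw [Bool.eq_iff_iff, decide_eq_true_eq, Bool.and_eq_true, decide_eq_true_eq, decide_eq_true_eq]
      constructor
      · intro h
        refine ⟨fun k hk hjk => ?_, ?_⟩
        · have := h k (by omega) hjk
          rwa [pv_getD_append l a k hk, pv_getD_append l a j hjn] at this
        · have := h l.length (by omega) hjn
          rw [pv_getD_append_self, pv_getD_append l a j hjn] at this
          exact fun hh => this hh.symm
      · rintro ⟨h1, h2⟩ k hk hjk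
        rcases Nat.lt_or_ge k l.length with hkn | hkn
        · rw [pv_getD_append l a k hkn, pv_getD_append l a j hjn]
          exact h1 k hkn hjk
        · have hke : k = l.length := by omega
          subst hke
          rw [pv_getD_append_self, pv_getD_append l a j hjn]
          exact fun hh => h2 hh.symm
  · have hlast : ∀ k < (l ++ [a]).length, l.length < k → (l ++ [a]).getD k 0 ≠ (l ++ [a]).getD l.length 0 := by
      intro k hk hlk
      simp [List.length_append] at hk
      omega
    simp only [List.filter_cons, List.filter_nil]
    rw [decide_eq_true (by simpa using hlast)]
    simp

theorem pv_core (l : List Int) :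
    (pvC l).map (fun j => l.getD j 0) = (pvFdd l.reverse).reverse := by
  induction l using List.reverseRecOn with
  | nil => simp [pvC, pvFdd]
  | append_singleton l a ih =>
    rw [pv_C_append, List.map_append, List.reverse_append, List.reverse_singleton, List.singleton_append, pvFdd_cons]
    simp only [List.map_cons, List.map_nil, List.reverse_cons]
    congr 1
    · have hgd : ∀ j ∈ (pvC l).filter (fun j => decide (l.getD j 0 ≠ a)),
          (l ++ [a]).getD j 0 = l.getD j 0 := by
        intro j hj
        have hjC : j ∈ pvC l := List.mem_of_mem_filter hj
        exact pv_getD_append l a j ((pv_mem_C l j).mp hjC).1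
      rw [List.map_congr_left hgd]
      rw [← List.filter_reverse, ← ih, List.filter_map]
      congr 1
    · simp

-- bridge: A's first inner loop computes (a cast of) a last-occurrence index, i.e. a member of pvC
theorem pv_temp_char (l : List Int) (i : Int) (hi : 0 ≤ i) (hin : i < (l.length : Int)) :
    ∃ j ∈ pvC l,
      (PySem.List.pyRange 0 (l.length : Int) 1).foldl
        (fun ci n => if PySem.List.pyGetD l i 0 = PySem.List.pyGetD l n 0 then n else ci)
        (((PySem.List.index? l (PySem.List.pyGetD l i 0)).getD 0 : Nat) : Int) = (j : Int)
      ∧ l.getD j 0 = PySem.List.pyGetD l i 0 := by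
  obtain ⟨i0, rfl⟩ : ∃ i0 : Nat, i = (i0 : Int) := ⟨i.toNat, (Int.toNat_of_nonneg hi).symm⟩
  have hi0 : i0 < l.length := by exact_mod_cast hin
  rw [PySem.List.pyRange_one, List.foldl_map]
  simp only [zero_add, Int.sub_zero, Int.toNat_natCast, PySem.List.pyGetD_natCast]
  have hex : ∃ ii, ii < l.length ∧ l.getD ii 0 = l.getD i0 0 := ⟨i0, hi0, rfl⟩
  obtain ⟨j, hj, hjm, hjv, hjlast⟩ := pv_inner l (l.getD i0 0) l.length
    (((PySem.List.index? l (l.getD i0 0)).getD 0 : Nat) : Int) hex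
  refine ⟨j, (pv_mem_C l j).mpr ⟨hjm, fun k hk1 hk2 => ?_⟩, hj, by rw [hjv]⟩
  rw [hjv]
  exact hjlast k hk1 hk2

-- A's body with input_list = [] ++ list collapsed to list (definitionally equal)
def pvAbody (l : List Int) : List Int :=
  PySem.List.slice
    ((PySem.List.pyRange 0 (l.length : Int) 1).foldl (fun (st : List Int × List Int) _ =>
      ((PySem.List.remove? st.1 ((PySem.List.min? st.1 (fun x => x)).getD 0)).getD st.1,
        if PySem.List.pyGetD l ((PySem.List.min? st.1 (fun x => x)).getD 0) 0 ∈ st.2 then st.2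
        else st.2 ++ [PySem.List.pyGetD l ((PySem.List.min? st.1 (fun x => x)).getD 0) 0]))
      ((PySem.List.pyRange 0 (l.length : Int) 1).foldl (fun temp i =>
        temp ++ [(PySem.List.pyRange 0 (l.length : Int) 1).foldl
          (fun ci n => if PySem.List.pyGetD l i 0 = PySem.List.pyGetD l n 0 then n else ci)
          (((PySem.List.index? l (PySem.List.pyGetD l i 0)).getD 0 : Nat) : Int)]) [], [])).2
    (some 0) (some 10)

theorem pv_Abody_eq (l : List Int) :
    pvAbody l = ((pvC l).map (fun j => l.getD j 0)).take 10 := by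
  unfold pvAbody
  rw [PySem.List.foldl_append_singleton_eq_map, List.nil_append]
  have h1 : ∀ x, x ∈ (PySem.List.pyRange 0 (l.length : Int) 1).map
      (fun i => (PySem.List.pyRange 0 (l.length : Int) 1).foldl
        (fun ci n => if PySem.List.pyGetD l i 0 = PySem.List.pyGetD l n 0 then n else ci)
        (((PySem.List.index? l (PySem.List.pyGetD l i 0)).getD 0 : Nat) : Int))
      ↔ ∃ j ∈ pvC l, x = (j : Int) := by
    intro x
    rw [List.mem_map]
    constructor
    · rintro ⟨i, hiR, hx⟩
      rcases (PySem.List.mem_pyRange_one).mp hiR with ⟨hi0, hin⟩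
      obtain ⟨j, hjC, hje, _⟩ := pv_temp_char l i hi0 hin
      exact ⟨j, hjC, by rw [← hx, hje]⟩
    · rintro ⟨j, hjC, rfl⟩
      have hjl := (pv_mem_C l j).mp hjC
      refine ⟨(j : Int), (PySem.List.mem_pyRange_one).mpr ⟨by positivity, by exact_mod_cast hjl.1⟩, ?_⟩
      obtain ⟨j', hj'C, hje, hjv⟩ := pv_temp_char l (j : Int) (by positivity) (by exact_mod_cast hjl.1)
      rw [hje]
      have : j' = j := pv_last_unique l j' j ((pv_mem_C l j').mp hj'C) hjl
        (by rw [hjv, PySem.List.pyGetD_natCast])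
      rw [this]
  have h2 : ((PySem.List.pyRange 0 (l.length : Int) 1).map
      (fun i => (PySem.List.pyRange 0 (l.length : Int) 1).foldl
        (fun ci n => if PySem.List.pyGetD l i 0 = PySem.List.pyGetD l n 0 then n else ci)
        (((PySem.List.index? l (PySem.List.pyGetD l i 0)).getD 0 : Nat) : Int))).length
      = (PySem.List.pyRange 0 (l.length : Int) 1).length := by
    rw [List.length_map]
  rw [pv_loop2 l (PySem.List.pyRange 0 (l.length : Int) 1) _ [] h2]
  rw [pv_vfold_nil]
  have hinj : ∀ x ∈ PySem.List.sorted ((PySem.List.pyRange 0 (l.length : Int) 1).map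
      (fun i => (PySem.List.pyRange 0 (l.length : Int) 1).foldl
        (fun ci n => if PySem.List.pyGetD l i 0 = PySem.List.pyGetD l n 0 then n else ci)
        (((PySem.List.index? l (PySem.List.pyGetD l i 0)).getD 0 : Nat) : Int))) (fun x => x) false,
      ∀ y ∈ PySem.List.sorted ((PySem.List.pyRange 0 (l.length : Int) 1).map
      (fun i => (PySem.List.pyRange 0 (l.length : Int) 1).foldl
        (fun ci n => if PySem.List.pyGetD l i 0 = PySem.List.pyGetD l n 0 then n else ci)
        (((PySem.List.index? l (PySem.List.pyGetD l i 0)).getD 0 : Nat) : Int))) (fun x => x) false,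
      (fun j => PySem.List.pyGetD l j 0) x = (fun j => PySem.List.pyGetD l j 0) y → x = y := by
    intro x hx y hy hxy
    rcases (h1 x).mp ((PySem.List.mem_sorted _ _ _ _).mp hx) with ⟨j1, hj1, rfl⟩
    rcases (h1 y).mp ((PySem.List.mem_sorted _ _ _ _).mp hy) with ⟨j2, hj2, rfl⟩
    simp only [PySem.List.pyGetD_natCast] at hxy
    have := pv_last_unique l j1 j2 ((pv_mem_C l j1).mp hj1) ((pv_mem_C l j2).mp hj2) hxy
    rw [this]
  rw [pv_fdd_map_inj _ _ hinj, pv_fdd_sorted l _ h1, List.map_map]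
  rw [PySem.List.slice_zero_start, show (10 : Int) = ((10 : Nat) : Int) from rfl,
    PySem.List.slice_to_natCast]
  congr 1
  apply List.map_congr_left
  intro j hj
  exact PySem.List.pyGetD_natCast l j 0


theorem pv_A_eq (l : List Int) (o : String) :
    get_most_overdue l o = ((pvC l).map (fun j => l.getD j 0)).take 10 := pv_Abody_eq l

theorem pv_B_eq (l : List Int) (o : String) :
    get_most_overdue_alt l o = ((pvFdd l.reverse).reverse).take 10 := by
  show PySem.List.slice
      ((l.reverse.foldl (fun (st : PySem.Set Int × List Int) v =>
        if PySem.Set.contains st.1 v then st else (PySem.Set.add st.1 v, st.2 ++ [v]))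
        (([] : List Int), ([] : List Int))).2).reverse none (some 10)
      = ((pvFdd l.reverse).reverse).take 10
  rw [pv_bfold l.reverse [], pv_vfold_nil]
  rw [show (10 : Int) = ((10 : Nat) : Int) from rfl, PySem.List.slice_to_natCast]

-- ===== VERDICT (by name: the statement is the Claim_ definition above) =====
theorem get_most_overdue_spec : Claim_equal_get_most_overdue := by
  intro list outputfile _
  unfold Spec_get_most_overdue
  rw [pv_A_eq, pv_B_eq, pv_core]
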